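-- pv_equiv track=rewrite | github.com/ajaythakur3369/GeeksforGeeks | 8_March_2024.py | sameFreq
-- ===== SOURCE A (Python) =====
-- def sameFreq(s):
--
--     '''
--     Code here
--     '''
--
--     freq = {}
--     for char in s:
--         if char in freq:
--             freq[char]+=1
--         else:
--             freq[char]=1
--     freq_list = list(set(freq.values()))
--     return (len(freq_list)==2 and max(freq_list)-min(freq_list)==1 and list(freq.values()).count(max(freq_list))==1) or len(freq_list)==1
-- ===== SOURCE B (Python) =====
-- def sameFreq(s):
--     t = sorted(s)
--     counts = []
--     i = 0
--     while i < len(t):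
--         j = i
--         while j < len(t) and t[j] == t[i]:
--             j += 1
--         counts.append(j - i)
--         i = j
--     distinct = set(counts)
--     if len(distinct) == 1:
--         return True
--     if len(distinct) != 2:
--         return False
--     hi = max(distinct)
--     return hi - min(distinct) == 1 and counts.count(hi) == 1
-- ===== Notes on version B (the rewrite author's own statement) =====
-- stated objective: alternative
-- what changed: B computes character frequencies as run lengths of the sorted string (sort + one linear run-length scan) instead of hashing characters into a dict, then applies the acceptance test with explicit early-return branching on the number of distinct counts.
import Mathlib
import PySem

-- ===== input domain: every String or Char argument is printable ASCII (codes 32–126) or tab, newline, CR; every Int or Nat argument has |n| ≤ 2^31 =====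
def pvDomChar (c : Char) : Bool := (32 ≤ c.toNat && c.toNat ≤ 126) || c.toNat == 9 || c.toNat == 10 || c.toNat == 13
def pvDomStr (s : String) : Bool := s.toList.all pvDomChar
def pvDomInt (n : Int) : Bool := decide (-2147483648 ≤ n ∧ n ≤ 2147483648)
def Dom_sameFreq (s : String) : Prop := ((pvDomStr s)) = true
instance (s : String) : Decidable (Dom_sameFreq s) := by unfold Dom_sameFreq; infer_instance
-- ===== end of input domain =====

-- B replaces A's dict-based character counting by run lengths of the sorted string (alternative algorithm, similar cost).


-- ===== PORT A =====
-- freq = {}; for char in s: freq[char] += 1 / = 1; freq_list = list(set(freq.values()));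
-- (len==2 and max-min==1 and values.count(max)==1) or len==1
-- (max/min are only reached when freq_list has 2 elements, so the .getD 0 totality default never fires)
def sameFreq (s : String) : Bool :=
  let freq : PySem.Dict Char Int :=
    s.toList.foldl
      (fun d char => if d.contains char then d.insert char (d.getD char 0 + 1) else d.insert char 1)
      PySem.Dict.empty
  let freq_list : PySem.Set Int := PySem.Set.ofList freq.values
  (decide (freq_list.length = 2)
      && decide ((PySem.List.max? freq_list (fun x => x)).getD 0
                   - (PySem.List.min? freq_list (fun x => x)).getD 0 = 1)
      && (freq.values.count ((PySem.List.max? freq_list (fun x => x)).getD 0) == 1))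
    || decide (freq_list.length = 1)

-- ===== PORT B =====
-- run lengths of a list: the two nested index loops of Source B walk each maximal run once
def runLengths (l : List Char) : List Int :=
  match l with
  | [] => []
  | c :: rest =>
      (((rest.takeWhile (fun x => x == c)).length : Int) + 1)
        :: runLengths (rest.dropWhile (fun x => x == c))
termination_by l.length
decreasing_by
  simp only [List.length_cons]
  exact Nat.lt_succ_of_le (List.length_dropWhile_le _ _)

def sameFreq_alt (s : String) : Bool :=
  let counts : List Int := runLengths (PySem.List.sorted s.toList (fun c => c) false)
  let distinct : PySem.Set Int := PySem.Set.ofList counts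
  if distinct.length = 1 then true
  else if ¬ distinct.length = 2 then false
  else
    let hi := (PySem.List.max? distinct (fun x => x)).getD 0
    decide (hi - (PySem.List.min? distinct (fun x => x)).getD 0 = 1)
      && (counts.count hi == 1)

-- ===== PRECONDITION & SPEC =====
def Spec_sameFreq (s : String) (out : Bool) : Prop := out = sameFreq_alt s
instance (s : String) (out : Bool) : Decidable (Spec_sameFreq s out) := by unfold Spec_sameFreq; infer_instance

-- ===== CLAIM (what is proved, stated in full; the proofs are below) =====
def Claim_equal_sameFreq : Prop := ∀ (s : String), Dom_sameFreq s → Spec_sameFreq s (sameFreq s)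

-- ===== LEMMAS AND PROOFS =====

-- the shared acceptance test as a function of the multiset of counts
def pvTest (counts : List Int) : Bool :=
  (decide ((PySem.Set.ofList counts).length = 2)
      && decide ((PySem.List.max? (PySem.Set.ofList counts) (fun x => x)).getD 0
                   - (PySem.List.min? (PySem.Set.ofList counts) (fun x => x)).getD 0 = 1)
      && (counts.count ((PySem.List.max? (PySem.Set.ofList counts) (fun x => x)).getD 0) == 1))
    || decide ((PySem.Set.ofList counts).length = 1)

lemma valuesA (xs : List Char) :
    (xs.foldl
      (fun d char => if d.contains char then d.insert char (d.getD char 0 + 1) else d.insert char 1)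
      (PySem.Dict.empty : PySem.Dict Char Int)).values
    = (PySem.List.dedup xs).map (fun c => (xs.count c : Int)) := by
  have h : xs.foldl
      (fun d char => if d.contains char then d.insert char (d.getD char 0 + 1) else d.insert char 1)
      (PySem.Dict.empty : PySem.Dict Char Int)
      = xs.foldl (fun d x => d.insert x (d.getD x 0 + 1)) PySem.Dict.empty := by
    apply PySem.List.foldl_congr_mem
    intro acc x _
    by_cases hc : acc.contains x = true
    · simp [hc]
    · have h0 : acc.getD x 0 = 0 := by
        apply PySem.Dict.getD_of_not_contains
        simpa using hc
      simp [hc, h0]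
  rw [h, PySem.Dict.foldl_insert_getD_add_one_eq_counter]
  simp [PySem.Dict.values, PySem.Dict.items_counter, List.map_map]

lemma not_mem_dropWhile (c : Char) (rest : List Char)
    (hs : rest.Pairwise (· ≤ ·)) (hc : ∀ x ∈ rest, c ≤ x) :
    c ∉ rest.dropWhile (fun x => x == c) := by
  induction rest with
  | nil => simp
  | cons x rs ih =>
      rcases List.pairwise_cons.mp hs with ⟨hx, hrs⟩
      by_cases hxc : x = c
      · subst hxc
        rw [List.dropWhile_cons_of_pos (by simp)]
        exact ih hrs (fun y hy => hc y (List.mem_cons_of_mem _ hy))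
      · rw [List.dropWhile_cons_of_neg (by simpa using fun hxx => hxc hxx)]
        intro hmem
        rcases List.mem_cons.mp hmem with hcx | hcrs
        · exact hxc hcx.symm
        · exact hxc (le_antisymm (hx c hcrs) (hc x (List.mem_cons_self)))

lemma runLengths_perm (l : List Char) (h : l.Pairwise (· ≤ ·)) :
    (runLengths l).Perm ((PySem.List.dedup l).map (fun c => (l.count c : Int))) := by
  induction l using runLengths.induct with
  | case1 => simp [runLengths]
  | case2 c rest ih =>
      rcases List.pairwise_cons.mp h with ⟨hc, hrest⟩
      have hd_pair : (rest.dropWhile (fun x => x == c)).Pairwise (· ≤ ·) :=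
        hrest.sublist (List.dropWhile_sublist _)
      have hcd : c ∉ rest.dropWhile (fun x => x == c) :=
        not_mem_dropWhile c rest hrest hc
      have ht : ∀ x ∈ rest.takeWhile (fun x => x == c), x = c :=
        fun x hx => by simpa using List.mem_takeWhile_imp hx
      have hsplit : rest.takeWhile (fun x => x == c) ++ rest.dropWhile (fun x => x == c) = rest :=
        List.takeWhile_append_dropWhile
      -- count of c in the whole list is the head run length
      have htc : (rest.takeWhile (fun x => x == c)).count c
          = (rest.takeWhile (fun x => x == c)).length :=
        List.count_eq_length.mpr (fun b hb => (ht b hb).symm)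
      have hdc : (rest.dropWhile (fun x => x == c)).count c = 0 :=
        List.count_eq_zero.mpr hcd
      have hrc := congrArg (List.count c) hsplit
      rw [List.count_append, htc, hdc] at hrc
      have hcount_c : ((c :: rest).count c : Int)
          = ((rest.takeWhile (fun x => x == c)).length : Int) + 1 := by
        rw [List.count_cons_self, ← hrc]
        push_cast
        ring
      -- counts of the remaining characters are unchanged
      have hcount_x : ∀ x ∈ rest.dropWhile (fun x => x == c),
          (c :: rest).count x = (rest.dropWhile (fun x => x == c)).count x := by
        intro x hx
        have hxc : x ≠ c := fun hxx => hcd (hxx ▸ hx)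
        have hxt : x ∉ rest.takeWhile (fun x => x == c) :=
          fun hmem => hxc (ht x hmem)
        have hrx := congrArg (List.count x) hsplit
        rw [List.count_append, List.count_eq_zero.mpr hxt, Nat.zero_add] at hrx
        have hcx : ¬ c = x := fun hcx => hxc hcx.symm
        simp [hrx, hcx]
      -- dedup (c :: rest) is a permutation of c :: dedup (dropWhile run)
      have hdedup : (PySem.List.dedup (c :: rest)).Perm
          (c :: PySem.List.dedup (rest.dropWhile (fun x => x == c))) := by
        rw [List.perm_ext_iff_of_nodup (PySem.List.nodup_dedup _)
          (List.nodup_cons.mpr ⟨fun hm => hcd ((PySem.List.mem_dedup _ _).mp hm),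
            PySem.List.nodup_dedup _⟩)]
        intro a
        simp only [PySem.List.mem_dedup, List.mem_cons]
        constructor
        · rintro (rfl | ha)
          · exact Or.inl rfl
          · rw [← hsplit] at ha
            rcases List.mem_append.mp ha with hat | had
            · exact Or.inl (ht a hat)
            · exact Or.inr had
        · rintro (rfl | ha)
          · exact Or.inl rfl
          · refine Or.inr ?_
            rw [← hsplit]
            exact List.mem_append.mpr (Or.inr ha)
      rw [runLengths]
      refine List.Perm.trans ?_ (hdedup.map _).symm
      rw [List.map_cons, ← hcount_c]
      refine List.Perm.cons _ ?_
      refine List.Perm.trans (ih hd_pair) ?_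
      apply List.Perm.of_eq
      exact List.map_congr_left (fun x hx =>
        congrArg Int.ofNat (hcount_x x ((PySem.List.mem_dedup _ _).mp hx)).symm)

lemma max?_id_eq_of_perm (V W : List Int) (h : V.Perm W) :
    PySem.List.max? V (fun x => x) = PySem.List.max? W (fun x => x) := by
  cases hV : PySem.List.max? V (fun x => x) with
  | none =>
      have : V = [] := (PySem.List.max?_eq_none_iff _ _).mp hV
      subst this
      rw [h.symm.eq_nil]
      exact hV.symm
  | some m =>
      cases hW : PySem.List.max? W (fun x => x) with
      | none =>
          have : W = [] := (PySem.List.max?_eq_none_iff _ _).mp hW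
          subst this
          have : V = [] := h.eq_nil
          rw [this] at hV
          rw [(PySem.List.max?_eq_none_iff _ _).mpr rfl] at hV; cases hV
      | some m' =>
          have hm : m ∈ V := PySem.List.max?_mem hV
          have hm' : m' ∈ W := PySem.List.max?_mem hW
          have h1 : m ≤ m' := PySem.List.max?_isMax hW m (h.mem_iff.mp hm)
          have h2 : m' ≤ m := PySem.List.max?_isMax hV m' (h.symm.mem_iff.mp hm')
          exact congrArg some (le_antisymm h1 h2)

lemma min?_id_eq_of_perm (V W : List Int) (h : V.Perm W) :
    PySem.List.min? V (fun x => x) = PySem.List.min? W (fun x => x) := by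
  cases hV : PySem.List.min? V (fun x => x) with
  | none =>
      have : V = [] := (PySem.List.min?_eq_none_iff _ _).mp hV
      subst this
      rw [h.symm.eq_nil]
      exact hV.symm
  | some m =>
      cases hW : PySem.List.min? W (fun x => x) with
      | none =>
          have : W = [] := (PySem.List.min?_eq_none_iff _ _).mp hW
          subst this
          have : V = [] := h.eq_nil
          rw [this] at hV
          rw [(PySem.List.min?_eq_none_iff _ _).mpr rfl] at hV; cases hV
      | some m' =>
          have hm : m ∈ V := PySem.List.min?_mem hV
          have hm' : m' ∈ W := PySem.List.min?_mem hW
          have h1 : m ≤ m' := PySem.List.min?_isMin hV m' (h.symm.mem_iff.mp hm')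
          have h2 : m' ≤ m := PySem.List.min?_isMin hW m (h.mem_iff.mp hm)
          exact congrArg some (le_antisymm h1 h2)

lemma ofList_perm_of_perm (V W : List Int) (h : V.Perm W) :
    (PySem.Set.ofList V).Perm (PySem.Set.ofList W) := by
  rw [List.perm_ext_iff_of_nodup (PySem.Set.nodup_ofList V) (PySem.Set.nodup_ofList W)]
  intro a
  rw [PySem.Set.mem_ofList, PySem.Set.mem_ofList]
  exact h.mem_iff

lemma pvTest_perm (V W : List Int) (h : V.Perm W) : pvTest V = pvTest W := by
  have hF := ofList_perm_of_perm V W h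
  unfold pvTest
  rw [max?_id_eq_of_perm _ _ hF, min?_id_eq_of_perm _ _ hF, hF.length_eq,
    h.count_eq]

lemma sameFreq_eq_test (s : String) :
    sameFreq s = pvTest ((PySem.List.dedup s.toList).map (fun c => (s.toList.count c : Int))) := by
  simp only [sameFreq, pvTest, valuesA]

lemma sameFreq_alt_eq_test (s : String) :
    sameFreq_alt s = pvTest (runLengths (PySem.List.sorted s.toList (fun c => c) false)) := by
  simp only [sameFreq_alt, pvTest]
  by_cases h1 :
      (PySem.Set.ofList (runLengths (PySem.List.sorted s.toList (fun c => c) false))).length = 1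
  · simp [h1]
  · by_cases h2 :
        (PySem.Set.ofList (runLengths (PySem.List.sorted s.toList (fun c => c) false))).length = 2
    · simp [h2]
    · simp [h1, h2]

-- ===== VERDICT (by name: the statement is the Claim_ definition above) =====
theorem sameFreq_spec : Claim_equal_sameFreq := by
  intro s _
  unfold Spec_sameFreq
  rw [sameFreq_eq_test, sameFreq_alt_eq_test]
  have hsorted := PySem.List.sorted_pairwise (xs := s.toList) (key := fun c => c)
  have hperm := runLengths_perm _ hsorted
  have hcnt : ∀ c : Char,
      (PySem.List.sorted s.toList (fun c => c) false).count c = s.toList.count c :=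
    fun c => (PySem.List.sorted_perm (xs := s.toList) (key := fun c => c) (rev := false)).count_eq c
  have hmap : ((PySem.List.dedup (PySem.List.sorted s.toList (fun c => c) false)).map
        (fun c => ((PySem.List.sorted s.toList (fun c => c) false).count c : Int)))
      = ((PySem.List.dedup (PySem.List.sorted s.toList (fun c => c) false)).map
        (fun c => (s.toList.count c : Int))) :=
    List.map_congr_left (fun x _ => congrArg Int.ofNat (hcnt x))
  have hded : (PySem.List.dedup (PySem.List.sorted s.toList (fun c => c) false)).Perm
      (PySem.List.dedup s.toList) := by
    rw [List.perm_ext_iff_of_nodup (PySem.List.nodup_dedup _) (PySem.List.nodup_dedup _)]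
    intro a
    rw [PySem.List.mem_dedup, PySem.List.mem_dedup, PySem.List.mem_sorted]
  have hchain : (runLengths (PySem.List.sorted s.toList (fun c => c) false)).Perm
      ((PySem.List.dedup s.toList).map (fun c => (s.toList.count c : Int))) := by
    refine List.Perm.trans hperm ?_
    rw [hmap]
    exact hded.map _
  exact (pvTest_perm _ _ hchain).symm
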